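-- pv_equiv track=rewrite | github.com/Salil03/COL106-Assignments | Ass3/a3.py | LowerBound_Y
-- ===== SOURCE A (Python) =====
-- def LowerBound_Y(arr: list, y_low):  # binary search first geq element
--     if arr[-1][1] < y_low:
--         return -1
--     idx = -1
--     low = 0
--     high = len(arr)-1
--     while low <= high:
--         mid = (low + high)//2
--         if arr[mid][1] >= y_low:
--             idx = mid
--             high = mid-1
--         else:
--             low = mid+1
--     return idx
-- ===== SOURCE B (Python) =====
-- def LowerBound_Y(arr: list, y_low):
--     if arr[-1][1] < y_low:
--         return -1
--
--     def go(low, size, best):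
--         # search window is arr[low : low+size]; best = best index found so far
--         if size == 0:
--             return best
--         half = (size - 1) // 2
--         mid = low + half
--         if arr[mid][1] >= y_low:
--             return go(low, half, mid)
--         return go(mid + 1, size - 1 - half, best)
--
--     return go(0, len(arr), -1)
-- ===== Notes on version B (the rewrite author's own statement) =====
-- stated objective: alternative
-- what changed: A's imperative while-loop over mutable Int bounds (low, high) is replaced by a recursive window search over a nonnegative offset and window SIZE with a best-so-far accumulator, so all index arithmetic is natural-number based and the loop state disappears.
import Mathlib
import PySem

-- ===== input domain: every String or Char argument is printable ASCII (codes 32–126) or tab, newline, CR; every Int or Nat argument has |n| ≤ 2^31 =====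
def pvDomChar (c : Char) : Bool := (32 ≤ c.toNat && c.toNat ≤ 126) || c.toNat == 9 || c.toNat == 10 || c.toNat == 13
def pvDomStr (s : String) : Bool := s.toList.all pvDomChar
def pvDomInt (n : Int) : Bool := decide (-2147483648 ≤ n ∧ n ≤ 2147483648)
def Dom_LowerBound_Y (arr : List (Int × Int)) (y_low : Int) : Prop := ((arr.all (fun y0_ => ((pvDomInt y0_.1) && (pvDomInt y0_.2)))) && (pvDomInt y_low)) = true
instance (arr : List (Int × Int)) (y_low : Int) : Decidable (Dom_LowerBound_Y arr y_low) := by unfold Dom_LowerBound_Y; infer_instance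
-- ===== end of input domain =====

-- B replaces A's Int-state (low, high) while-loop by a window recursion on a Nat offset and
-- window SIZE with a best-so-far accumulator (alternative decomposition; same probe sequence).


-- ===== PORT A =====
-- the while-loop of A over the mutable state (low, high, idx)
def pvLoopA (arr : List (Int × Int)) (y_low low high idx : Int) : Int :=
  if _h : low ≤ high then
    let mid := PySem.Int.floordiv (low + high) 2
    if ((PySem.List.pyGet? arr mid).getD (0, 0)).2 ≥ y_low then
      pvLoopA arr y_low low (mid - 1) mid
    else
      pvLoopA arr y_low (mid + 1) high idx
  else idx
termination_by (high + 1 - low).toNat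
decreasing_by
  · have := PySem.Int.floordiv_two_mid_bounds _h
    omega
  · have := PySem.Int.floordiv_two_mid_bounds _h
    omega

def LowerBound_Y (arr : List (Int × Int)) (y_low : Int) : Int :=
  match PySem.List.pyGet? arr (-1) with
  | none => 0  -- Python raises IndexError here (arr = []); excluded by Pre_
  | some last =>
    if last.2 < y_low then -1
    else pvLoopA arr y_low 0 ((arr.length : Int) - 1) (-1)

-- ===== PORT B =====
-- B's helper go(low, size, best): the window arr[low : low+size] by Nat offset/size; all
-- arithmetic is on nonnegative values, so Python's // 2 is Nat division and arr[mid] is a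
-- plain in-range Nat lookup (exact: mid < len(arr) holds throughout B's recursion).
def pvGoB (arr : List (Int × Int)) (y_low : Int) : Nat → Nat → Int → Int
  | _, 0, best => best
  | low, size + 1, best =>
    let half := size / 2
    let mid := low + half
    if ((arr.getD mid (0, 0)).2 ≥ y_low : Prop) then
      pvGoB arr y_low low half mid
    else
      pvGoB arr y_low (mid + 1) (size - half) best
termination_by _ size _ => size
decreasing_by all_goals omega

def LowerBound_Y_alt (arr : List (Int × Int)) (y_low : Int) : Int :=
  match PySem.List.pyGet? arr (-1) with
  | none => 0  -- Python raises IndexError here (arr = []); excluded by Pre_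
  | some last =>
    if last.2 < y_low then -1
    else pvGoB arr y_low 0 arr.length (-1)

-- ===== PRECONDITION & SPEC =====
-- Pre_ excludes only the empty list, on which both Pythons raise IndexError at arr[-1].
def Pre_LowerBound_Y (arr : List (Int × Int)) (_y_low : Int) : Prop := arr ≠ []
instance (arr : List (Int × Int)) (y_low : Int) : Decidable (Pre_LowerBound_Y arr y_low) := by unfold Pre_LowerBound_Y; infer_instance
def pvWitness_LowerBound_Y : (List (Int × Int)) × Int := ([(1, 2), (3, 5)], 4)

def Spec_LowerBound_Y (arr : List (Int × Int)) (y_low : Int) (out : Int) : Prop := out = LowerBound_Y_alt arr y_low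
instance (arr : List (Int × Int)) (y_low : Int) (out : Int) : Decidable (Spec_LowerBound_Y arr y_low out) := by unfold Spec_LowerBound_Y; infer_instance

-- ===== CLAIM (what is proved, stated in full; the proofs are below) =====
def Claim_equal_LowerBound_Y : Prop := ∀ (arr : List (Int × Int)) (y_low : Int), Dom_LowerBound_Y arr y_low → Pre_LowerBound_Y arr y_low → Spec_LowerBound_Y arr y_low (LowerBound_Y arr y_low)

-- ===== LEMMAS AND PROOFS =====
-- A's loop state (low, low+size-1, idx) corresponds to B's window (low, size, best).
theorem pvLoopA_eq_goB (arr : List (Int × Int)) (y_low : Int) :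
    ∀ (size low : Nat) (best : Int), low + size ≤ arr.length →
      pvLoopA arr y_low (low : Int) ((low : Int) + (size : Int) - 1) best =
        pvGoB arr y_low low size best := by
  intro size
  induction size using Nat.strong_induction_on with
  | _ size ih =>
    intro low best hle
    match size with
    | 0 =>
      rw [pvLoopA, pvGoB]
      rw [dif_neg (by omega)]
    | s + 1 =>
      rw [pvLoopA, pvGoB]
      rw [dif_pos (by push_cast; omega)]
      have hmid : PySem.Int.floordiv ((low : Int) + ((low : Int) + ((s : Nat) + 1 : Nat) - 1)) 2
          = ((low + s / 2 : Nat) : Int) := by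
        rw [PySem.Int.floordiv_eq_ediv_of_pos (by omega)]
        omega
      have hlt : low + s / 2 < arr.length := by omega
      have hget : PySem.List.pyGet? arr ((low + s / 2 : Nat) : Int)
          = some (arr.getD (low + s / 2) (0, 0)) := by
        rw [PySem.List.pyGet?_natCast, List.getElem?_eq_getElem hlt, List.getD_eq_getElem _ _ hlt]
      simp only [hmid, hget, Option.getD_some]
      split_ifs with hc
      · have := ih (s / 2) (by omega) low ((low + s / 2 : Nat) : Int) (by omega)
        rw [show ((low + s / 2 : Nat) : Int) - 1 = (low : Int) + ((s / 2 : Nat) : Int) - 1 by push_cast; ring]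
        exact this
      · have := ih (s - s / 2) (by omega) (low + s / 2 + 1) best (by omega)
        rw [show ((low + s / 2 : Nat) : Int) + 1 = ((low + s / 2 + 1 : Nat) : Int) by push_cast; ring,
            show (low : Int) + ((s + 1 : Nat) : Int) - 1 = ((low + s / 2 + 1 : Nat) : Int) + ((s - s / 2 : Nat) : Int) - 1 by push_cast; omega]
        exact this

-- ===== VERDICT (by name: the statement is the Claim_ definition above) =====
theorem LowerBound_Y_spec : Claim_equal_LowerBound_Y := by
  intro arr y_low _ hpre
  unfold Spec_LowerBound_Y LowerBound_Y LowerBound_Y_alt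
  cases hg : PySem.List.pyGet? arr (-1) with
  | none =>
    exact absurd (List.getLast?_eq_none_iff.mp (PySem.List.pyGet?_neg_one arr ▸ hg)) hpre
  | some last =>
    by_cases hlt : last.2 < y_low
    · simp [hlt]
    · simp only [if_neg hlt]
      have := pvLoopA_eq_goB arr y_low arr.length 0 (-1) (by omega)
      simpa using this
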